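-- pv_equiv track=rewrite | github.com/winemug/omnipy | manchester.py | manchesterEncodeSingleByte
-- ===== SOURCE A (Python) =====
-- def manchesterEncodeSingleByte(d):
--     e = 0
--     for b in range (0,15, 2):
--         if d & 0x01 == 0:
--             e |= (2 << b)
--         else:
--             e |= (1 << b)
--         d = d >> 1
--     return chr(e >> 8) + chr(e & 0xff)
-- ===== SOURCE B (Python) =====
-- def manchesterEncodeSingleByte(d):
--     x = d & 0xFF
--     x = (x | (x << 4)) & 0x0F0F
--     x = (x | (x << 2)) & 0x3333
--     x = (x | (x << 1)) & 0x5555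
--     e = x | ((x ^ 0x5555) << 1)
--     return chr(e >> 8) + chr(e & 0xff)
-- ===== Notes on version B (the rewrite author's own statement) =====
-- stated objective: alternative
-- what changed: Replaces the 8-iteration per-bit loop (mask, test, set one of two bits, shift) by a branch-free SWAR bit-interleave: mask to the low byte, spread its bits to even positions with three shift/mask steps, and derive the whole Manchester word as x | ((x ^ 0x5555) << 1).
import Mathlib
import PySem

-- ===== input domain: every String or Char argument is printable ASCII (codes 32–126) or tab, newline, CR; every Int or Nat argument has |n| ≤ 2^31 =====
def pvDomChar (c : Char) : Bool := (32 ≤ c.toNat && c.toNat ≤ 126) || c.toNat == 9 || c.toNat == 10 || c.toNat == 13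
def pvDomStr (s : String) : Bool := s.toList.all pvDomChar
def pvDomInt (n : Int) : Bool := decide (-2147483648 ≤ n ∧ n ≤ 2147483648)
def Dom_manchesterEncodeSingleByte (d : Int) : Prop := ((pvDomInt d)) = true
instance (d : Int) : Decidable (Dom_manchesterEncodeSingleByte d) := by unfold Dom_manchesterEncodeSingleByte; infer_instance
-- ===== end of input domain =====

-- B replaces A's 8-iteration bit loop by a branch-free SWAR bit-interleave (alternative decomposition, same cost).

-- ===== PORT A =====
-- 'chr(n)' is Char.ofNat n.toNat — exact here since both character codes lie in [0,256)
def manchesterEncodeSingleByte (d : Int) : String :=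
  let st : Int × Int := (PySem.List.pyRange 0 15 2).foldl
    (fun st b =>
      (if PySem.Int.band st.2 1 = 0 then PySem.Int.bor st.1 ((2:Int) <<< b.toNat)
       else PySem.Int.bor st.1 ((1:Int) <<< b.toNat),   -- b ∈ range(0,15,2) is ≥ 0, so b.toNat is exact
       st.2 >>> (1:Nat)))
    (0, d)
  String.mk [Char.ofNat (st.1 >>> (8:Nat)).toNat, Char.ofNat (PySem.Int.band st.1 255).toNat]

-- ===== PORT B =====
def manchesterEncodeSingleByte_alt (d : Int) : String :=
  let x0 := PySem.Int.band d 255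
  let x1 := PySem.Int.band (PySem.Int.bor x0 (x0 <<< (4:Nat))) 0x0F0F
  let x2 := PySem.Int.band (PySem.Int.bor x1 (x1 <<< (2:Nat))) 0x3333
  let x3 := PySem.Int.band (PySem.Int.bor x2 (x2 <<< (1:Nat))) 0x5555
  let e := PySem.Int.bor x3 ((PySem.Int.bxor x3 0x5555) <<< (1:Nat))
  String.mk [Char.ofNat (e >>> (8:Nat)).toNat, Char.ofNat (PySem.Int.band e 255).toNat]

-- ===== PRECONDITION & SPEC =====
def Spec_manchesterEncodeSingleByte (d : Int) (out : String) : Prop := out = manchesterEncodeSingleByte_alt d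
instance (d : Int) (out : String) : Decidable (Spec_manchesterEncodeSingleByte d out) := by unfold Spec_manchesterEncodeSingleByte; infer_instance

-- ===== CLAIM (what is proved, stated in full; the proofs are below) =====
def Claim_equal_manchesterEncodeSingleByte : Prop := ∀ (d : Int), Dom_manchesterEncodeSingleByte d → Spec_manchesterEncodeSingleByte d (manchesterEncodeSingleByte d)

-- ===== LEMMAS AND PROOFS =====

-- d & 1 is d mod 2 (Python bitwise-and on arbitrary-sign ints)
lemma pv_band_one (d : Int) : PySem.Int.band d 1 = d % 2 := by
  unfold PySem.Int.band
  rcases d with n | n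
  · have h : n &&& 1 = n % 2 := Nat.and_one_is_mod n
    norm_num [show ((1:Int).toNat) = 1 from rfl]
    try omega
  · have h : 1 &&& n = n % 2 := by rw [Nat.and_comm]; exact Nat.and_one_is_mod n
    norm_num [Int.negSucc_eq, show ((1:Int).toNat) = 1 from rfl]
    try omega

-- d & 255 is d mod 256
lemma pv_band_255 (d : Int) : PySem.Int.band d 255 = d % 256 := by
  unfold PySem.Int.band
  rcases d with n | n
  · have h : n &&& 255 = n % 256 := by
      have := Nat.and_two_pow_sub_one_eq_mod n 8; norm_num at this; exact this
    norm_num [show ((255:Int).toNat) = 255 from rfl]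
    omega
  · have h : 255 &&& n = n % 256 := by
      have := Nat.and_two_pow_sub_one_eq_mod n 8; norm_num at this
      rw [Nat.and_comm]; exact this
    norm_num [Int.negSucc_eq, show ((255:Int).toNat) = 255 from rfl]
    omega

-- d >> 1 is floor division by 2 (= Int '/' since % 256 keeps values ≥ 0 where needed; exact on all Int)
lemma pv_shift_one (d : Int) : d >>> (1:Nat) = d / 2 := by
  rcases d with n | n
  · show Int.ofNat (n >>> 1) = _
    have h : n >>> 1 = n / 2 := by have := Nat.shiftRight_eq_div_pow n 1; simpa using this
    simp only [h, Int.ofNat_eq_natCast]; omega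
  · show Int.negSucc (n >>> 1) = _
    have h : n >>> 1 = n / 2 := by have := Nat.shiftRight_eq_div_pow n 1; simpa using this
    simp only [h, Int.negSucc_eq]; omega

lemma pv_pyRangeEq : PySem.List.pyRange 0 15 2 = [0, 2, 4, 6, 8, 10, 12, 14] := by decide

-- A only reads the low 8 bits of d
lemma pv_normA (d : Int) : manchesterEncodeSingleByte d = manchesterEncodeSingleByte (d % 256) := by
  simp only [manchesterEncodeSingleByte, pv_pyRangeEq, List.foldl, pv_band_one, pv_shift_one]
  have h0 : d % 256 % 2 = d % 2 := by omega
  have h1 : d % 256 / 2 % 2 = d / 2 % 2 := by omega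
  have h2 : d % 256 / 2 / 2 % 2 = d / 2 / 2 % 2 := by omega
  have h3 : d % 256 / 2 / 2 / 2 % 2 = d / 2 / 2 / 2 % 2 := by omega
  have h4 : d % 256 / 2 / 2 / 2 / 2 % 2 = d / 2 / 2 / 2 / 2 % 2 := by omega
  have h5 : d % 256 / 2 / 2 / 2 / 2 / 2 % 2 = d / 2 / 2 / 2 / 2 / 2 % 2 := by omega
  have h6 : d % 256 / 2 / 2 / 2 / 2 / 2 / 2 % 2 = d / 2 / 2 / 2 / 2 / 2 / 2 % 2 := by omega
  have h7 : d % 256 / 2 / 2 / 2 / 2 / 2 / 2 / 2 % 2 = d / 2 / 2 / 2 / 2 / 2 / 2 / 2 % 2 := by omega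
  rw [h0, h1, h2, h3, h4, h5, h6, h7]

-- B only reads the low 8 bits of d (its first step is d & 255)
lemma pv_normB (d : Int) : manchesterEncodeSingleByte_alt d = manchesterEncodeSingleByte_alt (d % 256) := by
  simp only [manchesterEncodeSingleByte_alt, pv_band_255]
  have h : d % 256 % 256 = d % 256 := by omega
  rw [h]

-- on the 256 byte values the two ports agree, by evaluation
set_option maxRecDepth 20000 in
lemma pv_key : ∀ n : Nat, n < 256 → manchesterEncodeSingleByte (n : Int) = manchesterEncodeSingleByte_alt (n : Int) := by decide

-- ===== VERDICT (by name: the statement is the Claim_ definition above) =====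
theorem manchesterEncodeSingleByte_spec : Claim_equal_manchesterEncodeSingleByte := by
  intro d _
  unfold Spec_manchesterEncodeSingleByte
  rw [pv_normA d, pv_normB d]
  have h : d % 256 = ((d % 256).toNat : Int) := by omega
  rw [h]
  exact pv_key _ (by omega)
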